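-- pv_equiv track=rewrite | github.com/dasol11/1day_1coding | 백준/동적프로그래밍/알고리즘수업_피보나치.py | finbonacci
-- ===== SOURCE A (Python) =====
-- def finbonacci(n):
--     stk = [0]* (n+1)
--     cou_fin = 0
--     stk[1],stk[2] = 1,1
--     for i in range(3, n+1):
--         stk[i] = stk[i-1]+stk[i-2]
--         cou_fin += 1
--     return cou_fin
-- ===== SOURCE B (Python) =====
-- def finbonacci(n):
--     # closed form: the loop runs once for each i in range(3, n+1), i.e. n-2 times
--     return n - 2 if n >= 2 else 0
-- ===== Notes on version B (the rewrite author's own statement) =====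
-- stated objective: faster
-- what changed: B replaces A's O(n) Fibonacci-table loop with the closed form n-2 (the loop body runs exactly n-2 times).
import Mathlib
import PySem

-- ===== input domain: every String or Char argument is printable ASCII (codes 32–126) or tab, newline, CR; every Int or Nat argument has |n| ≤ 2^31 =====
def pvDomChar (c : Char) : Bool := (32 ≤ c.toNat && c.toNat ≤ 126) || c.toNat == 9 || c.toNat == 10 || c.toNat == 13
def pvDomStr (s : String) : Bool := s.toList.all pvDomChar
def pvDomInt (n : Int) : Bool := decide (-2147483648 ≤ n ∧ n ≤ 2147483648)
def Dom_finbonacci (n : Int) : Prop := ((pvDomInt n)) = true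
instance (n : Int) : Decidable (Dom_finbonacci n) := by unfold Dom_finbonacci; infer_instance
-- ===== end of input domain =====

-- B replaces A's O(n) Fibonacci-table loop by the closed form n-2 (objective: faster, asymptotic).

-- ===== PORT A =====
-- A builds stk = [0]*(n+1), sets stk[1],stk[2] = 1,1 (IndexError when n is below two, outside Pre_),
-- then for i in range(3, n+1) sets stk[i] = stk[i-1]+stk[i-2] and increments cou_fin.
def finbonacci (n : Int) : Int :=
  let stk : List Int := List.replicate (max (n + 1) 0).toNat 0
  let stk := (stk.set 1 1).set 2 1
  let st := (PySem.List.pyRange 3 (n + 1) 1).foldl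
    (fun (st : List Int × Int) i =>
      (st.1.set i.toNat (PySem.List.pyGetD st.1 (i - 1) 0 + PySem.List.pyGetD st.1 (i - 2) 0),
       st.2 + 1))
    (stk, 0)
  st.2

-- ===== PORT B =====
def finbonacci_alt (n : Int) : Int :=
  if n ≥ 2 then n - 2 else 0

-- ===== PRECONDITION & SPEC =====
-- A raises IndexError when n is below two (the table is too short for the stk assignments).
def Pre_finbonacci (n : Int) : Prop := 2 ≤ n
instance (n : Int) : Decidable (Pre_finbonacci n) := by unfold Pre_finbonacci; infer_instance
def pvWitness_finbonacci : Int := 5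

def Spec_finbonacci (n : Int) (out : Int) : Prop := out = finbonacci_alt n
instance (n : Int) (out : Int) : Decidable (Spec_finbonacci n out) := by unfold Spec_finbonacci; infer_instance

-- ===== CLAIM (what is proved, stated in full; the proofs are below) =====
def Claim_equal_finbonacci : Prop := ∀ (n : Int), Dom_finbonacci n → Pre_finbonacci n → Spec_finbonacci n (finbonacci n)

-- ===== LEMMAS AND PROOFS =====

-- A's loop increments its counter once per iteration, regardless of the table state.
theorem pvCount_foldl (l : List Int) (st : List Int × Int) :
    ((l.foldl (fun (st : List Int × Int) i =>
      (st.1.set i.toNat (PySem.List.pyGetD st.1 (i - 1) 0 + PySem.List.pyGetD st.1 (i - 2) 0),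
       st.2 + 1)) st).2) = st.2 + l.length := by
  induction l generalizing st with
  | nil => simp
  | cons x xs ih =>
    simp only [List.foldl_cons, ih, List.length_cons]
    omega

-- ===== VERDICT (by name: the statement is the Claim_ definition above) =====
theorem finbonacci_spec : Claim_equal_finbonacci := by
  intro n _ hpre
  unfold Pre_finbonacci at hpre
  unfold Spec_finbonacci finbonacci finbonacci_alt
  rw [pvCount_foldl, PySem.List.length_pyRange_one]
  simp only [ge_iff_le, hpre, if_pos]
  omega
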